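-- pv_equiv track=rewrite | github.com/plzzstudy/daily-algorithm | hyeyoon/programmers/level_01/separate_str.py | solution
-- ===== SOURCE A (Python) =====
-- def solution(s):
--     x_cnt = 0
--     n_cnt = 0
--     answer = 0
--     x = s[0]
--     for i in range(len(s)):
--         if s[i] == x:
--             x_cnt+=1
--         else:
--             n_cnt+=1
--         if x_cnt == n_cnt or i == len(s)-1:
--             answer+=1
--             if i < len(s)-1:
--                 x = s[i+1]
--             x_cnt=0
--             n_cnt=0
--     return answer
-- ===== SOURCE B (Python) =====
-- def _next_return(s, c):
--     # arr[j] = smallest k > j with equal running c-balance (match minus mismatch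
--     # count over s[:k] vs s[:j]), or len(s) if the balance never returns.
--     n = len(s)
--     fs = [0] * (n + 1)
--     for j in range(1, n + 1):
--         fs[j] = fs[j - 1] + (1 if s[j - 1] == c else -1)
--     nxt = {}
--     arr = [n] * (n + 1)
--     for j in range(n, -1, -1):
--         arr[j] = nxt.get(fs[j], n)
--         nxt[fs[j]] = j
--     return arr
--
-- def solution(s):
--     n = len(s)
--     succ = {}
--     ans = 0
--     i = 0
--     while i < n:
--         c = s[i]
--         if c not in succ:
--             succ[c] = _next_return(s, c)
--         ans += 1
--         i = succ[c][i]
--     return ans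
-- ===== Notes on version B (the rewrite author's own statement) =====
-- stated objective: alternative
-- what changed: A's single flat loop with manually reset match/mismatch counters is replaced by a staged algorithm: per anchor character B precomputes a next-balance-return array (prefix balance walk plus one backward dict pass) and caches it, and the main loop just hops from cut position to cut position through that index.
-- outside the precondition, e.g. on solution(''): A raises IndexError, B returns 0
import Mathlib
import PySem

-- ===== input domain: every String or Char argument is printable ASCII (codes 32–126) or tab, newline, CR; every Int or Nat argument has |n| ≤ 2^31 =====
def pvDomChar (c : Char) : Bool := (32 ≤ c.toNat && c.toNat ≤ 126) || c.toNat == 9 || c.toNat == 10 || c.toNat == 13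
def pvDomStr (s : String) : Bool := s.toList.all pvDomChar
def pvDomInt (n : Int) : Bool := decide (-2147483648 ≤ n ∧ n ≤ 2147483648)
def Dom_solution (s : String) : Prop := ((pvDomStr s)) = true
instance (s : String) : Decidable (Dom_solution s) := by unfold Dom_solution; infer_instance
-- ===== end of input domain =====

set_option maxRecDepth 8192

-- B replaces A's flat counter loop with a staged algorithm: per anchor character it
-- precomputes (prefix balance walk + one backward dict pass) a "next balance-return"
-- array, caches it, and the main loop just hops from cut to cut; equal return value on
-- every nonempty string (A raises IndexError on "", excluded by Pre_; B returns 0 there).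


-- ===== PORT A =====
-- literal transliteration of A: x = s[0] (IndexError on "" → none, excluded by Pre_),
-- then 'for i in range(len(s))' as a foldl over List.range with state (x_cnt, n_cnt, answer, x)
def aStep (cs : List Char) (n : Nat) (st : Int × Int × Int × Char) (i : Nat) :
    Int × Int × Int × Char :=
  let xc := if cs.getD i ' ' = st.2.2.2 then st.1 + 1 else st.1
  let nc := if cs.getD i ' ' = st.2.2.2 then st.2.1 else st.2.1 + 1
  if xc = nc ∨ i = n - 1 then
    (0, 0, st.2.2.1 + 1, if i < n - 1 then cs.getD (i + 1) ' ' else st.2.2.2)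
  else (xc, nc, st.2.2.1, st.2.2.2)

def solution (s : String) : Int :=
  match PySem.Str.pyGet? s 0 with
  | none => 0  -- unreachable under Pre_solution (Python raises IndexError here)
  | some x0 =>
    let cs := s.toList
    let n := cs.length
    ((List.range n).foldl (aStep cs n) (0, 0, 0, x0)).2.2.1

-- ===== PORT B =====
-- fs list of Source B's _next_return: fs[j] = running c-balance of s[:j]
def buildFs (c : Char) : List Char → Int → List Int
  | [], f => [f]
  | ch :: r, f => f :: buildFs c r (f + if ch = c then 1 else -1)

-- 'for j in range(n, -1, -1)': process fs back to front, j is the current index,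
-- nxt the dict, acc the arr entries already written (indices j+1 .. n)
def backPass (n : Nat) : List Int → Nat → PySem.Dict Int Nat → List Nat → List Nat
  | [], _, _, acc => acc
  | f :: t, j, nxt, acc => backPass n t (j - 1) (nxt.insert f j) (nxt.getD f n :: acc)

-- Source B's _next_return(s, c)
def nextRet (cs : List Char) (c : Char) : List Nat :=
  backPass cs.length (buildFs c cs 0).reverse cs.length PySem.Dict.empty []

-- Source B's main 'while i < n' loop (fuel n+1 suffices: i strictly increases, proved below)
def jumpLoop (cs : List Char) (n : Nat) : Nat → PySem.Dict Char (List Nat) → Int → Nat → Int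
  | 0, _, ans, _ => ans
  | fuel + 1, succ, ans, i =>
    -- c = s[i]; succ' = succ after 'if c not in succ: succ[c] = _next_return(s, c)'
    if i < n then
      jumpLoop cs n fuel
        (if succ.contains (cs.getD i ' ') then succ
         else succ.insert (cs.getD i ' ') (nextRet cs (cs.getD i ' ')))
        (ans + 1)
        (((if succ.contains (cs.getD i ' ') then succ
           else succ.insert (cs.getD i ' ') (nextRet cs (cs.getD i ' '))).getD (cs.getD i ' ') []).getD i n)
    else ans

def solution_alt (s : String) : Int :=
  jumpLoop s.toList s.toList.length (s.toList.length + 1) PySem.Dict.empty 0 0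

-- ===== PRECONDITION & SPEC =====
-- Pre_ excludes only the empty string, on which A raises IndexError (s[0])
def Pre_solution (s : String) : Prop := s ≠ ""
instance (s : String) : Decidable (Pre_solution s) := by unfold Pre_solution; infer_instance
def pvWitness_solution : String := "aabbac"

def Spec_solution (s : String) (out : Int) : Prop := out = solution_alt s
instance (s : String) (out : Int) : Decidable (Spec_solution s out) := by unfold Spec_solution; infer_instance

-- ===== CLAIM (what is proved, stated in full; the proofs are below) =====
def Claim_equal_solution : Prop := ∀ (s : String), Dom_solution s → Pre_solution s → Spec_solution s (solution s)

-- ===== LEMMAS AND PROOFS =====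

-- reference recursion both ports are reduced to: consume one group, recurse
def altInner (anchor : Char) (bal : Int) : List Char → List Char
  | [] => []
  | c :: r => if bal = 0 then c :: r else altInner anchor (bal + if c = anchor then 1 else -1) r

theorem altInner_length_le (anchor : Char) (bal : Int) (l : List Char) :
    (altInner anchor bal l).length ≤ l.length := by
  induction l generalizing bal with
  | nil => simp [altInner]
  | cons c r ih =>
    simp only [altInner]
    split
    · simp
    · exact le_trans (ih _) (by simp)

def altOuter : List Char → Int
  | [] => 0
  | c :: rest => 1 + altOuter (altInner c 1 rest)
termination_by l => l.length
decreasing_by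
  exact Nat.lt_succ_of_le (altInner_length_le c 1 rest)

-- number of characters altInner consumes
def firstZero (anchor : Char) (bal : Int) : List Char → Nat
  | [] => 0
  | c :: r => if bal = 0 then 0 else 1 + firstZero anchor (bal + if c = anchor then 1 else -1) r

theorem firstZero_le (anchor : Char) (bal : Int) (l : List Char) :
    firstZero anchor bal l ≤ l.length := by
  induction l generalizing bal with
  | nil => simp [firstZero]
  | cons c r ih =>
    simp only [firstZero, List.length_cons]
    split
    · simp
    · have := ih (bal + if c = anchor then 1 else -1)
      omega

theorem altInner_eq_drop (anchor : Char) (bal : Int) (l : List Char) :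
    altInner anchor bal l = l.drop (firstZero anchor bal l) := by
  induction l generalizing bal with
  | nil => simp [altInner, firstZero]
  | cons c r ih =>
    simp only [altInner, firstZero]
    split
    · simp
    · rw [Nat.add_comm, List.drop_succ_cons]
      exact ih _

theorem buildFs_length (c : Char) (l : List Char) (f : Int) :
    (buildFs c l f).length = l.length + 1 := by
  induction l generalizing f with
  | nil => simp [buildFs]
  | cons ch r ih => simp [buildFs, ih]

theorem buildFs_drop (c : Char) (l : List Char) (f : Int) :
    ∀ k, k ≤ l.length →
      (buildFs c l f).drop k = buildFs c (l.drop k) ((buildFs c l f).getD k 0) := by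
  induction l generalizing f with
  | nil =>
    intro k hk
    have hk0 : k = 0 := by simpa using hk
    subst hk0
    simp [buildFs]
  | cons ch r ih =>
    intro k hk
    cases k with
    | zero => simp [buildFs]
    | succ k' =>
      simp only [buildFs, List.drop_succ_cons, List.getD_cons_succ]
      exact ih _ k' (by simpa using hk)

-- the walk lemma: first index where the balance walk returns to its start value
theorem firstZero_eq_findIdx (c : Char) (l : List Char) :
    ∀ (bal v : Int),
      firstZero c bal l
        = (List.findIdx? (fun w => w = v) (buildFs c l (v + bal))).getD l.length := by
  induction l with
  | nil =>
    intro bal v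
    by_cases h : bal = 0
    · simp [firstZero, buildFs, List.findIdx?_cons, h]
    · have hne : (v + bal = v) = False := by simp; omega
      simp [firstZero, buildFs, List.findIdx?_cons, hne]
  | cons ch r ih =>
    intro bal v
    by_cases h : bal = 0
    · simp [firstZero, buildFs, List.findIdx?_cons, h]
    · have hrec := ih (bal + if ch = c then 1 else -1) v
      rw [show v + (bal + if ch = c then 1 else -1) = v + bal + (if ch = c then 1 else -1)
        by ring] at hrec
      have hnd : (v + bal = v) = False := by simp; omega
      simp only [firstZero, buildFs, List.findIdx?_cons, if_neg h, hnd, decide_false,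
        Bool.false_eq_true, if_false, List.length_cons]
      rw [Option.getD_map (fun i => i + 1) r.length, ← hrec]
      omega

-- mathematical reading of arr[j]: first index k ≥ t with fs[k] = v, else n
def nextFrom (fs : List Int) (n : Nat) (v : Int) (t : Nat) : Nat :=
  match List.findIdx? (fun w => w = v) (fs.drop t) with
  | some m => t + m
  | none => n

theorem backPass_spec (fs : List Int) (n : Nat) :
    ∀ (t : Nat), t ≤ fs.length →
    ∀ (nxt : PySem.Dict Int Nat) (acc : List Nat),
      (∀ v, nxt.getD v n = nextFrom fs n v t) →
      backPass n ((fs.take t).reverse) (t - 1) nxt acc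
        = ((List.range t).map (fun j => nextFrom fs n (fs.getD j 0) (j + 1))) ++ acc := by
  intro t
  induction t with
  | zero => intro _ nxt acc _; simp [backPass]
  | succ t ih =>
    intro ht nxt acc hinv
    have hlt : t < fs.length := by omega
    have htake : fs.take (t + 1) = fs.take t ++ [fs.getD t 0] := by
      rw [List.take_add_one]
      simp [List.getElem?_eq_getElem hlt, List.getD_eq_getElem?_getD]
    rw [htake, List.reverse_append]
    simp only [List.reverse_singleton, List.singleton_append, backPass, Nat.add_sub_cancel]
    have hstep : backPass n (fs.take t).reverse (t - 1)
        (nxt.insert (fs.getD t 0) t) (nxt.getD (fs.getD t 0) n :: acc)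
        = ((List.range t).map (fun j => nextFrom fs n (fs.getD j 0) (j + 1)))
            ++ (nxt.getD (fs.getD t 0) n :: acc) := by
      apply ih (by omega)
      intro v
      rw [PySem.Dict.getD_insert]
      have hdrop : fs.drop t = fs.getD t 0 :: fs.drop (t + 1) := by
        rw [List.drop_eq_getElem_cons hlt, List.getD_eq_getElem?_getD,
          List.getElem?_eq_getElem hlt]
        rfl
      by_cases hv : v = fs.getD t 0
      · subst hv
        rw [if_pos rfl]
        unfold nextFrom
        rw [hdrop, List.findIdx?_cons, if_pos (decide_eq_true rfl)]
        rfl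
      · rw [if_neg hv, hinv v]
        unfold nextFrom
        rw [hdrop, List.findIdx?_cons,
          if_neg (fun hh => hv (of_decide_eq_true hh).symm)]
        cases hfind : List.findIdx? (fun w => decide (w = v)) (fs.drop (t + 1)) <;> simp <;> omega
    rw [hstep, hinv (fs.getD t 0), List.range_succ]
    simp

theorem nextRet_getD (cs : List Char) (c : Char) (i : Nat) (hi : i ≤ cs.length) :
    (nextRet cs c).getD i cs.length
      = nextFrom (buildFs c cs 0) cs.length ((buildFs c cs 0).getD i 0) (i + 1) := by
  have hlen := buildFs_length c cs 0
  have h := backPass_spec (buildFs c cs 0) cs.length (cs.length + 1) (by omega)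
    PySem.Dict.empty []
    (by
      intro v
      rw [PySem.Dict.getD_empty]
      simp [nextFrom, List.drop_eq_nil_of_le (by omega : (buildFs c cs 0).length ≤ cs.length + 1)])
  rw [List.take_of_length_le (by omega), Nat.add_sub_cancel] at h
  unfold nextRet
  rw [h, List.append_nil]
  rw [List.getD_eq_getElem?_getD, List.getElem?_map,
    List.getElem?_range (by omega : i < cs.length + 1)]
  simp

-- one hop of B's main loop = one group of the reference recursion
theorem hop_eq (cs : List Char) (i : Nat) (hi : i < cs.length) :
    (nextRet cs (cs.getD i ' ')).getD i cs.length
      = i + 1 + firstZero (cs.getD i ' ') 1 (cs.drop (i + 1)) := by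
  set c := cs.getD i ' ' with hc
  set fs := buildFs c cs 0 with hfs
  have hdropi : cs.drop i = c :: cs.drop (i + 1) := by
    rw [List.drop_eq_getElem_cons hi, hc, List.getD_eq_getElem?_getD,
      List.getElem?_eq_getElem hi]
    rfl
  have h3 := buildFs_drop c cs 0 i (by omega)
  rw [hdropi] at h3
  have hstep : buildFs c (c :: cs.drop (i + 1)) (fs.getD i 0)
      = fs.getD i 0 :: buildFs c (cs.drop (i + 1)) (fs.getD i 0 + 1) := by
    simp only [buildFs, if_true]
  have h4 : fs.drop (i + 1) = buildFs c (cs.drop (i + 1)) (fs.getD i 0 + 1) := by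
    have := congrArg (List.drop 1) h3
    rw [List.drop_drop, hstep] at this
    simpa using this
  rw [nextRet_getD cs c i (by omega), ← hfs]
  unfold nextFrom
  rw [h4]
  have hz := firstZero_eq_findIdx c (cs.drop (i + 1)) 1 (fs.getD i 0)
  cases hfind : List.findIdx? (fun w => decide (w = fs.getD i 0))
      (buildFs c (cs.drop (i + 1)) (fs.getD i 0 + 1)) with
  | none =>
    rw [hfind, Option.getD_none] at hz
    rw [hz]
    simp
    omega
  | some m =>
    rw [hfind, Option.getD_some] at hz
    rw [hz]

-- B's main loop computes altOuter of the remaining suffix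
theorem jumpLoop_eq_altOuter (cs : List Char) :
    ∀ (fuel i : Nat) (succ : PySem.Dict Char (List Nat)) (ans : Int),
      i ≤ cs.length → cs.length - i < fuel →
      (∀ k v, succ.get? k = some v → v = nextRet cs k) →
      jumpLoop cs cs.length fuel succ ans i = ans + altOuter (cs.drop i) := by
  intro fuel
  induction fuel with
  | zero => omega
  | succ fuel ih =>
    intro i succ ans hi hfuel hinv
    by_cases hlt : i < cs.length
    · rw [jumpLoop, if_pos hlt]
      set c := cs.getD i ' ' with hc
      have hgetD : (if succ.contains c then succ else succ.insert c (nextRet cs c)).getD c []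
          = nextRet cs c := by
        by_cases hcon : succ.contains c
        · rw [if_pos hcon]
          cases hget : succ.get? c with
          | none =>
            exfalso
            rw [PySem.Dict.contains_eq_isSome_get?, hget] at hcon
            simp at hcon
          | some v =>
            rw [PySem.Dict.getD_eq_get?_getD, hget, hinv c v hget]
            rfl
        · rw [if_neg hcon, PySem.Dict.getD_insert_self]
      have hinv' : ∀ k v,
          (if succ.contains c then succ else succ.insert c (nextRet cs c)).get? k = some v →
          v = nextRet cs k := by
        intro k v hk
        by_cases hcon : succ.contains c
        · rw [if_pos hcon] at hk; exact hinv k v hk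
        · rw [if_neg hcon, PySem.Dict.get?_insert] at hk
          by_cases hkc : k = c
          · rw [if_pos hkc] at hk
            subst hkc
            exact (Option.some.inj hk).symm
          · rw [if_neg hkc] at hk
            exact hinv k v hk
      rw [hgetD, hop_eq cs i hlt, ← hc]
      have hle := firstZero_le c 1 (cs.drop (i + 1))
      have hlen : (cs.drop (i + 1)).length = cs.length - (i + 1) := by simp
      have hdropi : cs.drop i = c :: cs.drop (i + 1) := by
        rw [List.drop_eq_getElem_cons hlt, hc, List.getD_eq_getElem?_getD,
          List.getElem?_eq_getElem hlt]
        rfl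
      rw [ih (i + 1 + firstZero c 1 (cs.drop (i + 1))) _ (ans + 1) (by omega) (by omega) hinv']
      rw [hdropi, altOuter, altInner_eq_drop, ← List.drop_drop, ← List.drop_drop]
      ring
    · rw [jumpLoop, if_neg hlt]
      have : i = cs.length := by omega
      subst this
      simp [altOuter]

-- ================= A's side (flat loop → reference recursion) =================

-- A's loop rewritten as recursion on the character list (proof artifact);
-- a singleton always closes (i = len-1 forces the close in A), so it is its own case
def aRec (x : Char) (xc nc ans : Int) : List Char → Int
  | [] => ans
  | [_] => ans + 1
  | c :: c' :: rest =>
    let xc' := if c = x then xc + 1 else xc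
    let nc' := if c = x then nc else nc + 1
    if xc' = nc' then aRec c' 0 0 (ans + 1) (c' :: rest)
    else aRec x xc' nc' ans (c' :: rest)

theorem foldl_range'_eq_aRec (cs : List Char) :
    ∀ (k i0 : Nat), i0 + k = cs.length → ∀ st : Int × Int × Int × Char,
    ((List.range' i0 k).foldl (aStep cs cs.length) st).2.2.1
      = aRec st.2.2.2 st.1 st.2.1 st.2.2.1 (cs.drop i0) := by
  intro k
  induction k with
  | zero =>
    intro i0 h st
    simp [List.drop_eq_nil_of_le (by omega : cs.length ≤ i0), aRec]
  | succ k ih =>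
    intro i0 h st
    obtain ⟨xc, nc, ans, x⟩ := st
    have hi0 : i0 < cs.length := by omega
    obtain ⟨c, rest, hdrop⟩ : ∃ c rest, cs.drop i0 = c :: rest := by
      cases hcs : cs.drop i0 with
      | nil => exact absurd (List.drop_eq_nil_iff.mp hcs) (by omega)
      | cons c rest => exact ⟨c, rest, rfl⟩
    have h0 : cs[i0]? = some c := by
      have h1 : (cs.drop i0)[0]? = cs[i0 + 0]? := List.getElem?_drop
      rw [hdrop] at h1; simpa using h1.symm
    have hget : cs.getD i0 ' ' = c := by simp [List.getD_eq_getElem?_getD, h0]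
    have hrest : rest = cs.drop (i0 + 1) := by
      have := congrArg (List.drop 1) hdrop
      simpa [List.drop_drop] using this.symm
    have hrlen : rest.length = k := by rw [hrest]; simp; omega
    rw [List.range'_succ, List.foldl_cons, ih (i0 + 1) (by omega), ← hrest, hdrop]
    cases rest with
    | nil =>
      have hk : k = 0 := by simpa using hrlen.symm
      have hlast : ¬ i0 < cs.length - 1 := by omega
      have hlast' : i0 = cs.length - 1 := by omega
      simp [aStep, aRec, hlast']
    | cons c' rest' =>
      have hnlast : i0 < cs.length - 1 := by simp at hrlen; omega
      have hnlast' : i0 ≠ cs.length - 1 := by omega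
      have h2 : cs[i0 + 1]? = some c' := by
        have h1 : (cs.drop i0)[1]? = cs[i0 + 1]? := List.getElem?_drop
        rw [hdrop] at h1; simpa using h1.symm
      by_cases hclose : (if c = x then xc + 1 else xc) = (if c = x then nc else nc + 1)
      · simp [aStep, aRec, h0, h2, hclose, hnlast]
      · simp [aStep, aRec, h0, hclose, hnlast']

theorem aRec_eq_altOuter_aux (n : Nat) :
    ∀ l : List Char, l.length ≤ n →
    (∀ (x : Char) (xc nc ans : Int), l ≠ [] → xc - nc ≠ 0 →
        aRec x xc nc ans l = ans + 1 + altOuter (altInner x (xc - nc) l))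
    ∧ (∀ (c : Char) (rest : List Char) (ans : Int), l = c :: rest →
        aRec c 0 0 ans l = ans + altOuter l) := by
  induction n with
  | zero =>
    intro l hl
    have : l = [] := List.eq_nil_of_length_eq_zero (by omega)
    subst this
    exact ⟨fun _ _ _ _ h _ => absurd rfl h, fun _ _ _ h => by cases h⟩
  | succ n ih =>
    intro l hl
    constructor
    · intro x xc nc ans hne hbal
      obtain ⟨c, rest, rfl⟩ := List.exists_cons_of_ne_nil hne
      have hrl : rest.length ≤ n := by simp at hl; omega
      have hstep : (if c = x then xc + 1 else xc) - (if c = x then nc else nc + 1)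
          = xc - nc + if c = x then 1 else -1 := by
        by_cases h : c = x <;> simp [h] <;> ring
      cases rest with
      | nil =>
        simp only [aRec, altInner, if_neg hbal, altOuter]
        omega
      | cons c' rest' =>
        by_cases hclose : (if c = x then xc + 1 else xc) = (if c = x then nc else nc + 1)
        · have hb0 : xc - nc + (if c = x then 1 else -1) = 0 := by
            rw [← hstep]; omega
          simp only [aRec, if_pos hclose]
          rw [altInner, if_neg hbal, hb0, altInner, if_pos rfl]
          have := (ih (c' :: rest') hrl).2 c' rest' (ans + 1) rfl
          rw [this]
        · have hb0 : xc - nc + (if c = x then 1 else -1) ≠ 0 := by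
            rw [← hstep]; omega
          simp only [aRec, if_neg hclose]
          rw [altInner, if_neg hbal]
          have := (ih (c' :: rest') hrl).1 x
            (if c = x then xc + 1 else xc) (if c = x then nc else nc + 1) ans
            (by simp) (by omega)
          rw [this, hstep]
    · intro c rest ans hl'
      subst hl'
      have hrl : rest.length ≤ n := by simp at hl; omega
      cases rest with
      | nil =>
        simp [aRec, altOuter, altInner]
      | cons c' rest' =>
        have h1 := (ih (c' :: rest') hrl).1 c 1 0 ans (List.cons_ne_nil _ _) (by norm_num)
        norm_num at h1
        simp only [aRec]
        norm_num
        rw [h1, altOuter]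
        ring

-- ===== VERDICT (by name: the statement is the Claim_ definition above) =====
theorem solution_spec : Claim_equal_solution := by
  intro s _ hpre
  unfold Spec_solution solution solution_alt
  obtain ⟨c, rest, hcs⟩ : ∃ c rest, s.toList = c :: rest := by
    cases h : s.toList with
    | nil => exact absurd (String.toList_eq_nil_iff.mp h) hpre
    | cons c rest => exact ⟨c, rest, rfl⟩
  have hget : PySem.Str.pyGet? s 0 = some c := by
    simp [PySem.Str.pyGet?, hcs]
  rw [hget]
  dsimp only
  have h1 := foldl_range'_eq_aRec s.toList s.toList.length 0 (by omega) (0, 0, 0, c)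
  rw [List.range_eq_range']
  simp only [List.drop_zero] at h1
  rw [h1, hcs]
  have h2 := (aRec_eq_altOuter_aux (c :: rest).length (c :: rest) le_rfl).2 c rest 0 rfl
  rw [h2]
  have h3 := jumpLoop_eq_altOuter s.toList (s.toList.length + 1) 0 PySem.Dict.empty 0
    (by omega) (by omega)
    (by intro k v h; rw [PySem.Dict.get?_empty] at h; cases h)
  simp only [hcs, List.drop_zero] at h3
  exact h3.symm
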